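-- pv_equiv track=rewrite | github.com/mirishkarganesh/HLAI | src/utils.py | sliding_window_chunks
-- ===== SOURCE A (Python) =====
-- from typing import List, Dict, Any
--
-- def sliding_window_chunks(sentences: List[str], max_chars: int = 1200, overlap_sentences: int = 1) -> List[str]:
--     chunks: List[str] = []
--     start = 0
--     while start < len(sentences):
--         current: List[str] = []
--         total = 0
--         i = start
--         while i < len(sentences) and total + len(sentences[i]) + 1 <= max_chars:
--             current.append(sentences[i])
--             total += len(sentences[i]) + 1
--             i += 1
--         if not current:
--             # Fallback for very long single sentence
--             current = [sentences[start][:max_chars]]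
--             i = start + 1
--         chunks.append(" ".join(current))
--         if i >= len(sentences):
--             break
--         start = max(i - overlap_sentences, start + 1)
--     return chunks
-- ===== SOURCE B (Python) =====
-- from typing import List
--
-- def sliding_window_chunks(sentences: List[str], max_chars: int = 1200, overlap_sentences: int = 1) -> List[str]:
--     n = len(sentences)
--     # prefix sums: pref[k] = sum(len(sentences[j]) + 1 for j < k)
--     pref = [0]
--     for s in sentences:
--         pref.append(pref[-1] + len(s) + 1)
--     chunks: List[str] = []
--     start = 0
--     while start < n:
--         target = pref[start] + max_chars
--         # binary search: largest i in [start, n] with pref[i] <= target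
--         # (pref is strictly increasing, so this is exactly A's greedy boundary)
--         lo, hi = start, n
--         while lo < hi:
--             mid = (lo + hi + 1) // 2
--             if pref[mid] <= target:
--                 lo = mid
--             else:
--                 hi = mid - 1
--         i = lo
--         if i == start:
--             # first sentence alone already overflows: truncate it
--             chunks.append(sentences[start][:max_chars])
--             i = start + 1
--         else:
--             chunks.append(" ".join(sentences[start:i]))
--         if i >= n:
--             break
--         start = max(i - overlap_sentences, start + 1)
--     return chunks
-- ===== Notes on version B (the rewrite author's own statement) =====
-- stated objective: alternative
-- what changed: B precomputes a prefix-sum array of sentence lengths once and finds each window's boundary by binary search on it, instead of A's inner while-loop that re-accumulates lengths for every window.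
import Mathlib
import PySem

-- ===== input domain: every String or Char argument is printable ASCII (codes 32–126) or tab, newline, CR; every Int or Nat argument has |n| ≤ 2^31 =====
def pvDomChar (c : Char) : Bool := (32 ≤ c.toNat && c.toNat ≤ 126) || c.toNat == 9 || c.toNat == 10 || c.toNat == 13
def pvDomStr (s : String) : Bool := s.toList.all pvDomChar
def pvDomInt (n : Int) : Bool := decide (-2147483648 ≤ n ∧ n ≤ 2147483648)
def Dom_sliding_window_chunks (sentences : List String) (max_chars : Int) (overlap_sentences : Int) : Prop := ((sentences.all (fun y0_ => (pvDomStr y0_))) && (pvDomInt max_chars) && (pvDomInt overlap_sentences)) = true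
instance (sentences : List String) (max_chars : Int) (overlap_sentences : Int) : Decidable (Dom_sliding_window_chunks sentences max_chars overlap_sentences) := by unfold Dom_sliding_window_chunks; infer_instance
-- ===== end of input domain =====

-- B replaces A's per-window inner accumulation loop by one prefix-sum pass plus a binary
-- search for each window boundary (objective: alternative; return values proved equal).

-- ===== PORT A =====
-- inner `while i < len(sentences) and total + len(sentences[i]) + 1 <= max_chars:` loop of A
-- (fuel only makes the loop structurally recursive; `sentences.length` steps always suffice)
def pvInnerA (sentences : List String) (max_chars : Int) :
    Nat → List String → Int → Int → List String × Int
  | 0, current, _, i => (current, i)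
  | fuel + 1, current, total, i =>
    if i < (sentences.length : Int) ∧
        total + PySem.Str.len (PySem.List.pyGetD sentences i "") + 1 ≤ max_chars then
      pvInnerA sentences max_chars fuel
        (current ++ [PySem.List.pyGetD sentences i ""])
        (total + PySem.Str.len (PySem.List.pyGetD sentences i "") + 1) (i + 1)
    else
      (current, i)

-- outer `while start < len(sentences):` loop of A
def pvOuterA (sentences : List String) (max_chars : Int) (overlap_sentences : Int) :
    Nat → List String → Int → List String
  | 0, chunks, _ => chunks
  | fuel + 1, chunks, start =>
    if start < (sentences.length : Int) then
      let r := pvInnerA sentences max_chars sentences.length [] 0 start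
      -- `if not current:` fallback for a very long single sentence
      let ci : List String × Int :=
        if r.1 = [] then
          ([PySem.Str.slice (PySem.List.pyGetD sentences start "") none (some max_chars)], start + 1)
        else r
      let chunks' := chunks ++ [PySem.Str.join " " ci.1]
      if ci.2 ≥ (sentences.length : Int) then chunks'
      else pvOuterA sentences max_chars overlap_sentences fuel chunks'
        (max (ci.2 - overlap_sentences) (start + 1))
    else chunks

def sliding_window_chunks (sentences : List String) (max_chars : Int) (overlap_sentences : Int) : List String :=
  pvOuterA sentences max_chars overlap_sentences sentences.length [] 0

-- ===== PORT B =====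
-- `pref = [0]; for s in sentences: pref.append(pref[-1] + len(s) + 1)` — the running last
-- value is carried as the accumulator, each element is emitted in order.
def pvPref (acc : Int) : List String → List Int
  | [] => [acc]
  | s :: rest => acc :: pvPref (acc + PySem.Str.len s + 1) rest

-- B's hand-written binary search: largest i in [lo, hi] with pref[i] <= target,, structurally recursive on a fuel that bounds hi - lo
def pvBS (pref : List Int) (target : Int) : Nat → Int → Int → Int
  | 0, lo, _ => lo
  | fuel + 1, lo, hi =>
    if lo < hi then
      let mid := PySem.Int.floordiv (lo + hi + 1) 2
      if PySem.List.pyGetD pref mid 0 ≤ target then pvBS pref target fuel mid hi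
      else pvBS pref target fuel lo (mid - 1)
    else lo

-- outer `while start < n:` loop of B
def pvOuterB (sentences : List String) (pref : List Int) (max_chars : Int)
    (overlap_sentences : Int) : Nat → List String → Int → List String
  | 0, chunks, _ => chunks
  | fuel + 1, chunks, start =>
    if start < (sentences.length : Int) then
      let target := PySem.List.pyGetD pref start 0 + max_chars
      let i0 := pvBS pref target sentences.length start (sentences.length : Int)
      let ci : String × Int :=
        if i0 = start then
          (PySem.Str.slice (PySem.List.pyGetD sentences start "") none (some max_chars), start + 1)
        else
          (PySem.Str.join " " (PySem.List.slice sentences (some start) (some i0)), i0)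
      let chunks' := chunks ++ [ci.1]
      if ci.2 ≥ (sentences.length : Int) then chunks'
      else pvOuterB sentences pref max_chars overlap_sentences fuel chunks'
        (max (ci.2 - overlap_sentences) (start + 1))
    else chunks

def sliding_window_chunks_alt (sentences : List String) (max_chars : Int) (overlap_sentences : Int) : List String :=
  pvOuterB sentences (pvPref 0 sentences) max_chars overlap_sentences sentences.length [] 0

-- ===== PRECONDITION & SPEC =====
def Spec_sliding_window_chunks (sentences : List String) (max_chars : Int) (overlap_sentences : Int) (out : List String) : Prop := out = sliding_window_chunks_alt sentences max_chars overlap_sentences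
instance (sentences : List String) (max_chars : Int) (overlap_sentences : Int) (out : List String) : Decidable (Spec_sliding_window_chunks sentences max_chars overlap_sentences out) := by unfold Spec_sliding_window_chunks; infer_instance

-- ===== CLAIM (what is proved, stated in full; the proofs are below) =====
def Claim_equal_sliding_window_chunks : Prop := ∀ (sentences : List String) (max_chars : Int) (overlap_sentences : Int), Dom_sliding_window_chunks sentences max_chars overlap_sentences → Spec_sliding_window_chunks sentences max_chars overlap_sentences (sliding_window_chunks sentences max_chars overlap_sentences)

-- ===== LEMMAS AND PROOFS =====

-- weight of a list of sentences: Σ (len s + 1)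
def pvS (l : List String) : Int := (l.map (fun s => PySem.Str.len s + 1)).sum

theorem pvStrLen_nonneg (s : String) : 0 ≤ PySem.Str.len s := by
  simp [PySem.Str.len_eq]

theorem pvS_nonneg (l : List String) : 0 ≤ pvS l := by
  induction l with
  | nil => simp [pvS]
  | cons s rest ih =>
    have := pvStrLen_nonneg s
    simp only [pvS, List.map_cons, List.sum_cons] at *
    omega

theorem pvS_append (a b : List String) : pvS (a ++ b) = pvS a + pvS b := by
  simp [pvS]

theorem pvS_take_succ (l : List String) (k : Nat) (hk : k < l.length) :
    pvS (l.take (k + 1)) = pvS (l.take k) + (PySem.Str.len l[k] + 1) := by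
  have h2 : l.take (k+1) = l.take k ++ [l[k]] := by
    rw [List.take_add_one, List.getElem?_eq_getElem hk]
    simp
  rw [h2, pvS_append]
  simp [pvS]

theorem pvS_take_le (l : List String) (k : Nat) : pvS (l.take k) ≤ pvS l := by
  conv_rhs => rw [← List.take_append_drop k l]
  rw [pvS_append]
  have := pvS_nonneg (l.drop k)
  omega

theorem pvS_take_mono (l : List String) {k k' : Nat} (h : k ≤ k') :
    pvS (l.take k) ≤ pvS (l.take k') := by
  have : l.take k = (l.take k').take k := by
    rw [List.take_take, Nat.min_eq_left h]
  rw [this]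
  exact pvS_take_le _ _

-- pref[k] = acc + pvS (l.take k)
theorem pvPref_getD (l : List String) (acc : Int) (k : Nat) (hk : k ≤ l.length) :
    (pvPref acc l).getD k 0 = acc + pvS (l.take k) := by
  induction l generalizing acc k with
  | nil =>
    have : k = 0 := by simpa using hk
    subst this; simp [pvPref, pvS]
  | cons s rest ih =>
    cases k with
    | zero => simp [pvPref, pvS]
    | succ m =>
      simp only [pvPref, List.getD_cons_succ]
      rw [ih _ m (by simpa using hk)]
      simp [pvS]
      ring

-- the boundary predicate both loops compute (relative to window start)
def pvGood (l : List String) (mc : Int) (start j : Nat) : Prop :=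
  start ≤ j ∧ j ≤ l.length ∧
  (j = start ∨ pvS (l.take j) - pvS (l.take start) ≤ mc) ∧
  (j = l.length ∨ pvS (l.take (j + 1)) - pvS (l.take start) > mc)

theorem pvGood_unique (l : List String) (mc : Int) (start j1 j2 : Nat)
    (h1 : pvGood l mc start j1) (h2 : pvGood l mc start j2) : j1 = j2 := by
  obtain ⟨a1, b1, c1, d1⟩ := h1
  obtain ⟨a2, b2, c2, d2⟩ := h2
  by_contra hne
  -- wlog j1 < j2
  rcases Nat.lt_or_ge j1 j2 with hlt | hge
  · have hj2 : pvS (l.take j2) - pvS (l.take start) ≤ mc := by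
      rcases c2 with rfl | h; · omega
      exact h
    have hd : pvS (l.take (j1 + 1)) - pvS (l.take start) > mc := by
      rcases d1 with rfl | h; · omega
      exact h
    have : pvS (l.take (j1 + 1)) ≤ pvS (l.take j2) := pvS_take_mono l (by omega)
    omega
  · have hlt : j2 < j1 := by omega
    have hj1 : pvS (l.take j1) - pvS (l.take start) ≤ mc := by
      rcases c1 with rfl | h; · omega
      exact h
    have hd : pvS (l.take (j2 + 1)) - pvS (l.take start) > mc := by
      rcases d2 with rfl | h; · omega
      exact h
    have : pvS (l.take (j2 + 1)) ≤ pvS (l.take j1) := pvS_take_mono l (by omega)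
    omega

-- characterization of A's inner loop
theorem pvInnerA_spec (l : List String) (mc : Int) :
    ∀ fuel k : Nat, l.length - k ≤ fuel → k ≤ l.length → ∀ (cur : List String) (total : Int),
    ∃ j : Nat, k ≤ j ∧ j ≤ l.length ∧
      pvInnerA l mc fuel cur total (k : Int) = (cur ++ (l.take j).drop k, (j : Int)) ∧
      (j = k ∨ total + (pvS (l.take j) - pvS (l.take k)) ≤ mc) ∧
      (j = l.length ∨ total + (pvS (l.take (j + 1)) - pvS (l.take k)) > mc) := by
  intro fuel
  induction fuel with
  | zero =>
    intro k hd hk cur total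
    have hkl : k = l.length := by omega
    exact ⟨k, le_refl _, hk, by simp [pvInnerA], Or.inl rfl, Or.inl hkl⟩
  | succ fuel ih =>
    intro k hd hk cur total
    by_cases hklt : k < l.length
    · have hget : PySem.List.pyGetD l (k : Int) "" = l[k] := by
        simp [PySem.List.pyGetD_natCast, List.getD_eq_getElem?_getD, List.getElem?_eq_getElem hklt]
      by_cases hc : total + PySem.Str.len l[k] + 1 ≤ mc
      · -- loop body runs
        obtain ⟨j, hj1, hj2, hj3, hj4, hj5⟩ :=
          ih (k + 1) (by omega) (by omega) (cur ++ [l[k]]) (total + PySem.Str.len l[k] + 1)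
        refine ⟨j, by omega, hj2, ?_, ?_, ?_⟩
        · simp only [pvInnerA]
          rw [if_pos ⟨by exact_mod_cast hklt, by rw [hget]; exact hc⟩]
          rw [hget]
          have hcast : (k : Int) + 1 = ((k + 1 : Nat) : Int) := by push_cast; ring
          rw [hcast, hj3]
          have hkj : k < (l.take j).length := by
            rw [List.length_take]; omega
          rw [List.drop_eq_getElem_cons hkj]
          simp [List.getElem_take]
        · right
          rcases hj4 with rfl | h
          · rw [pvS_take_succ l k hklt]; omega
          · rw [pvS_take_succ l k hklt] at h; omega
        · rcases hj5 with rfl | h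
          · exact Or.inl rfl
          · right; rw [pvS_take_succ l k hklt] at h; omega
      · -- condition fails at k
        refine ⟨k, le_refl _, by omega, ?_, Or.inl rfl, ?_⟩
        · simp only [pvInnerA]
          rw [if_neg (by rw [hget]; intro h; exact hc h.2)]
          simp
        · right
          rw [pvS_take_succ l k hklt]
          omega
    · -- k = l.length: the index test fails immediately
      have hkl : k = l.length := by omega
      refine ⟨k, le_refl _, by omega, ?_, Or.inl rfl, Or.inl hkl⟩
      simp only [pvInnerA]
      rw [if_neg (by intro h; exact absurd (by exact_mod_cast h.1) hklt)]
      simp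

-- characterization of B's binary search
theorem pvBS_spec (l : List String) (mc : Int) (start : Nat) :
    ∀ fuel lo hi : Nat, hi - lo ≤ fuel → start ≤ lo → lo ≤ hi → hi ≤ l.length →
    (lo = start ∨ pvS (l.take lo) - pvS (l.take start) ≤ mc) →
    (hi = l.length ∨ pvS (l.take (hi + 1)) - pvS (l.take start) > mc) →
    ∃ j : Nat, pvBS (pvPref 0 l) (pvS (l.take start) + mc) fuel (lo : Int) (hi : Int) = (j : Int) ∧
      pvGood l mc start j := by
  intro fuel
  induction fuel with
  | zero =>
    intro lo hi hd hs hlh hhl hclo hchi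
    have : lo = hi := by omega
    subst this
    refine ⟨lo, by simp [pvBS], hs, by omega, hclo, ?_⟩
    rcases hchi with rfl | h
    · exact Or.inl rfl
    · exact Or.inr h
  | succ fuel ih =>
    intro lo hi hd hs hlh hhl hclo hchi
    by_cases hlt : lo < hi
    · -- one bisection step
      have hmb := PySem.Int.floordiv_two_mid_bounds (lo := (lo : Int) + 1) (hi := (hi : Int))
        (by exact_mod_cast hlt)
      have hm1 : (lo : Int) + 1 + (hi : Int) = (lo : Int) + (hi : Int) + 1 := by ring
      rw [hm1] at hmb
      set midI : Int := PySem.Int.floordiv ((lo : Int) + (hi : Int) + 1) 2 with hmidI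
      obtain ⟨hmb1, hmb2⟩ := hmb
      have hmeq : midI = ((midI.toNat : Nat) : Int) := by omega
      set m : Nat := midI.toNat with hmdef
      have hlom : lo < m := by omega
      have hmhi : m ≤ hi := by omega
      have hpref : PySem.List.pyGetD (pvPref 0 l) midI 0 = pvS (l.take m) := by
        rw [hmeq]
        rw [PySem.List.pyGetD_natCast]
        rw [pvPref_getD l 0 m (by omega)]
        ring
      simp only [pvBS]
      rw [if_pos (show ((lo : Int) < (hi : Int)) by exact_mod_cast hlt)]
      simp only [← hmidI, hpref]
      by_cases hcm : pvS (l.take m) ≤ pvS (l.take start) + mc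
      · rw [if_pos hcm, hmeq]
        exact ih m hi (by omega) (by omega) hmhi hhl (Or.inr (by omega)) hchi
      · rw [if_neg hcm]
        have hm1' : midI - 1 = ((m - 1 : Nat) : Int) := by omega
        rw [hm1']
        refine ih lo (m - 1) (by omega) hs (by omega) (by omega) hclo ?_
        right
        have : m - 1 + 1 = m := by omega
        rw [this]
        omega
    · -- lo = hi: done
      have : lo = hi := by omega
      subst this
      refine ⟨lo, ?_, hs, by omega, hclo, ?_⟩
      · simp only [pvBS]
        rw [if_neg (by omega)]
      · rcases hchi with rfl | h
        · exact Or.inl rfl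
        · exact Or.inr h

-- the two outer loops agree
theorem pvOuter_eq (l : List String) (mc ov : Int) :
    ∀ fuel : Nat, ∀ start : Nat, l.length - start ≤ fuel → ∀ chunks : List String,
    pvOuterA l mc ov fuel chunks (start : Int) =
      pvOuterB l (pvPref 0 l) mc ov fuel chunks (start : Int) := by
  have hjoin1 : ∀ x : String, PySem.Str.join " " [x] = x := by
    intro x
    unfold PySem.Str.join
    simp only [String.reduceToList, List.map_cons, List.map_nil, PySem.Chars.join_singleton,
      String.ofList_toList]
  intro fuel
  induction fuel with
  | zero => intro start hd chunks; simp [pvOuterA, pvOuterB]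
  | succ fuel ih =>
    intro start hd chunks
    by_cases hs : start < l.length
    · have hsI : (start : Int) < (l.length : Int) := by exact_mod_cast hs
      -- A's inner loop result
      obtain ⟨j, hj1, hj2, hj3, hj4, hj5⟩ :=
        pvInnerA_spec l mc l.length start (by omega) (by omega) [] 0
      have hgoodA : pvGood l mc start j := by
        refine ⟨hj1, hj2, ?_, ?_⟩
        · rcases hj4 with rfl | h; · exact Or.inl rfl
          · right; omega
        · rcases hj5 with rfl | h; · exact Or.inl rfl
          · right; omega
      -- B's target value
      have htgt : PySem.List.pyGetD (pvPref 0 l) (start : Int) 0 + mc = pvS (l.take start) + mc := by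
        rw [PySem.List.pyGetD_natCast, pvPref_getD l 0 start (by omega)]
        ring
      -- B's binary search result
      obtain ⟨j', hbs, hgoodB⟩ :=
        pvBS_spec l mc start l.length start l.length (by omega) (le_refl _) (by omega)
          (le_refl _) (Or.inl rfl) (Or.inl rfl)
      have hjj : j' = j := pvGood_unique l mc start j' j hgoodB hgoodA
      rw [hjj] at hbs
      -- unfold one step of each loop
      simp only [pvOuterA, pvOuterB]
      rw [if_pos hsI, if_pos hsI]
      simp only [htgt, hbs, hj3, List.nil_append]
      have hlen : ((l.take j).drop start).length = j - start := by
        rw [List.length_drop, List.length_take]; omega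
      by_cases hjs : j = start
      · -- fallback branch on both sides
        have hempty : (l.take j).drop start = [] := by
          apply List.eq_nil_of_length_eq_zero
          omega
        rw [if_pos hempty, if_pos (show ((j : Int) = (start : Int)) by exact_mod_cast hjs)]
        simp only [hjoin1]
        by_cases hbrk : (start : Int) + 1 ≥ (l.length : Int)
        · rw [if_pos hbrk, if_pos hbrk]
        · rw [if_neg hbrk, if_neg hbrk]
          set s' : Int := max ((start : Int) + 1 - ov) ((start : Int) + 1) with hs'
          have hge : (start : Int) + 1 ≤ s' := le_max_right _ _
          have hcast : s' = ((s'.toNat : Nat) : Int) := by omega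
          rw [hcast]
          refine ih s'.toNat ?_ _
          omega
      · -- regular branch on both sides
        have hne : (l.take j).drop start ≠ [] := by
          intro h
          have := congrArg List.length h
          simp [hlen] at this
          omega
        rw [if_neg hne, if_neg (show ¬((j : Int) = (start : Int)) by exact_mod_cast hjs)]
        have hslice : PySem.List.slice l (some (start : Int)) (some (j : Int)) =
            (l.take j).drop start := by
          rw [PySem.List.slice_natCast, List.drop_take]
        simp only [hslice]
        by_cases hbrk : (j : Int) ≥ (l.length : Int)
        · rw [if_pos hbrk, if_pos hbrk]
        · rw [if_neg hbrk, if_neg hbrk]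
          set s' : Int := max ((j : Int) - ov) ((start : Int) + 1) with hs'
          have hge : (start : Int) + 1 ≤ s' := le_max_right _ _
          have hcast : s' = ((s'.toNat : Nat) : Int) := by omega
          rw [hcast]
          refine ih s'.toNat ?_ _
          omega
    · simp only [pvOuterA, pvOuterB]
      rw [if_neg (by exact_mod_cast hs), if_neg (by exact_mod_cast hs)]

-- ===== VERDICT (by name: the statement is the Claim_ definition above) =====
theorem sliding_window_chunks_spec : Claim_equal_sliding_window_chunks := by
  intro sentences mc ov _
  unfold Spec_sliding_window_chunks sliding_window_chunks sliding_window_chunks_alt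
  have := pvOuter_eq sentences mc ov sentences.length 0 (by omega) []
  simpa using this
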